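/- GENERATED by mk_final_copies.py from the proof of the farm's unit `vorbis_decode_packet_rest.6` (farm:vorbis_decode_packet_rest.6.2: Proof.lean) as the
   re-elaboration sweep compiled it — do not edit. -/
import Asan.CheckWalk
import Vorbis.Spec.Units.vorbis_decode_packet_rest_6
import Vorbis.Spec.Worked.vorbis_decode_packet_rest_6_Lemmas
open X86 X86.User Asan Vorbis Vorbis.Spec Vorbis.Spec.vorbis_decode_packet_rest Vorbis.Spec.vorbis_decode_packet_rest_6

set_option maxRecDepth 4000
set_option maxHeartbeats 4000000

/-- Segment 6 of `vorbis_decode_packet_rest` (0x111265 … 0x1112b3, lines 3302–3304: `for (j = 0; j < g->values; ++j) if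
(!step2_flag[j]) finalY[j] = -1;`), from the assertion `At6` to `At7b` at 0x1112d0. The loop invariant at the head 0x11127e:
`ebx = j ≤ values`, `r12 = finalY[i]`, `r13 = map`, `r14d = i`, the steady rsp, and `hsame`: the memory differs from the one at the
segment's entry only in the eight bytes below the steady rsp (the return addresses of the two check calls) and inside the block at
`finalY[i]`. Everything the exit assertion says of the memory follows from `hsame` by the pure lemma `stable_carry` (Lemmas.lean);
the unchecked load of `g->values` at the head reads the same number in every such memory (`values_read`: SEP). -/
theorem Vorbis.Spec.Worked.vorbis_decode_packet_rest_6_ok : Vorbis.Spec.vorbis_decode_packet_rest_6.Statement := by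
  intro Lay hLay μ hμ u₀ hcode hload1 hstore2
  intro others frames len Ar stored room mode ysz e ret i v hat
  -- 1. the ENTRY state's facts
  have he := hat.entry
  v_entry he
  -- 2. the present state
  have w_rip := hat.rip
  have v_rsp : v.reg .rsp = e.reg .rsp - 3000 := hat.rsp
  have w_eq : Mem.EqOn Vorbis.L.textLo Vorbis.L.textHi u₀.mem v.mem := hat.code
  have hdf : v.flags .df = false := (show abiInv _ from hat.abi).1
  have hmx : v.mxcsr &&& 0x1F80 = 0x1F80 := (show abiInv _ from hat.abi).2
  have hsse := Vorbis.sseOK_of_abiInv hat.abi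
  -- the constants of the segment: the block at `finalY[i]`, the mapping record, the floor `g`
  obtain ⟨fy, hfy⟩ : ∃ fy : Nat, stb_vorbis.finalY v.mem (fOf e) i = fy := ⟨_, rfl⟩
  obtain ⟨mp, hmp⟩ : ∃ mp : Nat, mapOf v.mem (fOf e) (mOf e) = mp := ⟨_, rfl⟩
  obtain ⟨g, hg⟩ : ∃ g : Nat, (v.reg .r15).toNat = g := ⟨_, rfl⟩
  have hgfl : IsFloor v.mem (fOf e) g := by
    rw [← hg]
    exact hat.g
  obtain ⟨V, hV2, hV250, hVy, hg1, hg2, hvalm⟩ := values_read hat.inv hat.i_lt hgfl hg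
  rw [hfy] at hvalm
  have hpos : 0 < ysz i := by omega
  obtain ⟨hfy1, hfy2, hfy3⟩ := fy_where hat.inv hat.i_lt hpos
  rw [hfy] at hfy1 hfy2 hfy3
  have hfy1' : 0x119d40 ≤ fy := hfy1
  -- 3. the stack slots the segment loads
  have si : v.mem.readLE (e.reg .rsp - 2944) 4 = i := by
    have := hat.slot_i
    simp only [slot32, spOf, addr_norm] at this
    exact this
  have sfy : v.mem.readLE (e.reg .rsp - 2968) 8 = fy := by
    have := hat.slot_finalY
    simp only [slot64, spOf, addr_norm] at this
    rw [hfy] at this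
    exact this
  have smap : v.mem.readLE (e.reg .rsp - 2952) 8 = mp := by
    have := hat.slot_map
    simp only [slot64, spOf, addr_norm] at this
    rw [hmp] at this
    exact this
  -- 4. 0x111265 … 0x111279 (line 3302): `r14d = i`, `r13 = map`, `ebx = j = 0`, `r12 = finalY`, to the loop head
  u_walk hcode [hμ.vendor] until [Vorbis.L.vorbis_decode_packet_rest.loop4] span [Vorbis.L.textLo, Vorbis.L.textHi] side (v_side)
  -- the loop head 0x11127e
  obtain ⟨j, w_rbx', hj⟩ : ∃ j : Nat, s_111279.reg .rbx = UInt64.ofNat j ∧ j ≤ V := ⟨0, w_rbx, Nat.zero_le _⟩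
  have w_rsp : s_111279.reg .rsp = e.reg .rsp - 3000 := by
    rw [w_kept .rsp rfl]
    exact v_rsp
  have hsame : Mem.SameExcept [⟨(e.reg .rsp).toNat - 3008, (e.reg .rsp).toNat - 3000⟩, ⟨fy, fy + ysz i⟩]
      v.mem s_111279.mem := by
    u_same
  have hdf' : s_111279.flags .df = false := by
    rw [w_flags]
    exact hdf
  have hmx' : s_111279.mxcsr &&& 0x1F80 = 0x1F80 := by
    rw [w_mxcsr]
    exact hmx
  have hval : s_111279.mem.readLE (v.reg .r15 + 1592) 4 = V := hvalm _ _ _ (by omega) (by omega) hsame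
  replace w_kept := w_kept.mono_all (S' := [.rsp, .rbx, .r12, .r13, .r14, .rbp, .rdi, .rax, .rcx, .rdx]) (by rfl)
  clear w_mem w_flags w_mxcsr w_rbx
  u_loop [j] (fun s => V - (s.reg .rbx).toNat)
  u_walk hcode [hμ.vendor] until [Vorbis.L.vorbis_decode_packet_rest.loop4, Vorbis.L.vorbis_decode_packet_rest.cut15] span [Vorbis.L.textLo, Vorbis.L.textHi] side (v_side)
  · -- 0x111292, line 3303: the check of `step2_flag[j]`: the byte lies in the frame object `do_not_decode` (256 bytes)
    have hjV : ¬ V ≤ j := fun h => hbr_111285 ((cmp_counter V j (by omega) (by omega)).mpr h)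
    have hsx := sext_counter j (by omega)
    have hun : ShadowUntouched v.mem s_111292.mem := by v_untouched
    have ho : (⟨(e.reg .rsp).toNat - 2872 + 192, 256, .stack⟩ : Obj) ∈ stackObjs (framesIn frames e) ++ others := by
      apply List.mem_append_left
      unfold framesIn
      rw [stackObjs_cons]
      apply List.mem_append_left
      unfold FrameLayout.objsAt Vorbis.Frames.vorbis_decode_packet_rest
      simp only [List.map_cons, List.mem_cons, true_or, or_true]
    exact Vorbis.check_small hat.shadow hun ho (by decide) (by simp only []; u_omega) (by simp only []; u_omega)
  · -- 0x1112a8, line 3304: the check of `finalY[j]`: inside the block at `finalY[i]` (FY1: `2 * values ≤ ysz i`)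
    have hjV : ¬ V ≤ j := fun h => hbr_111285 ((cmp_counter V j (by omega) (by omega)).mpr h)
    have hsx := sext_counter j (by omega)
    have hun : ShadowUntouched v.mem s_1112a8.mem := by v_untouched
    have hblk := (hat.inv.fy i hat.i_lt).1
    rw [hfy] at hblk
    have hsite : Site (LiveSet others (framesIn frames e)) (fy + 2 * j) 2 :=
      Site.of_blk hat.inv.live hblk (by simp only []; omega) (by simp only []; omega) (by omega)
    exact Vorbis.Spec.check_site hat.shadow hun hsite (by u_omega)
  · -- the store misses the text: the block lies above it
    have hjV : ¬ V ≤ j := fun h => hbr_111285 ((cmp_counter V j (by omega) (by omega)).mpr h)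
    have hsx := sext_counter j (by omega)
    u_omega
  · -- 0x111285: `values ≤ j`, the exit to segment .7 (entry B, 0x1112d0): STABLE over the stores of the loop
    have hsame2 : Mem.SameExcept [⟨(e.reg .rsp).toNat - 3008, (e.reg .rsp).toNat - 3000⟩,
        ⟨stb_vorbis.finalY v.mem (fOf e) i, stb_vorbis.finalY v.mem (fOf e) i + ysz i⟩] v.mem s_111285.mem := by
      rw [hfy, w_mem]
      exact hsame
    have hdf2 : s_111285.flags .df = false := by
      rw [w_flags]
      simp only [X86.User.df_setStatus]
      exact hdf'
    have hmx2 : s_111285.mxcsr &&& 0x1F80 = 0x1F80 := by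
      rw [w_mxcsr]
      exact hmx'
    obtain ⟨hst, ech, emap⟩ := stable_carry hat.toStable hat.i_lt hpos (w := s_111285) w_rsp
      (Vorbis.abiInv_of hdf2 hmx2) hsame2
    have hC16 := hat.inv.config.header.HD1.2
    have hilt := hat.i_lt
    refine ReachVia.done (Or.inl ⟨hst, w_rip, ?_, ?_, ?_⟩)
    · -- `r14d = i`
      rw [w_r14]
      exact zext32_small i (by omega)
    · -- `i < channels`
      rw [ech]
      exact hilt
    · -- `r13 = map`
      rw [w_r13, emap, hmp, UInt64.toNat_ofNat']
      have := v.mem.readLE_lt' (e.reg .rsp - 2952) 8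
      rw [smap] at this
      omega
  · -- the back edge from 0x11129f: `step2_flag[j] ≠ 0`; only the return address of the check call was stored
    have hjV : ¬ V ≤ j := fun h => hbr_111285 ((cmp_counter V j (by omega) (by omega)).mpr h)
    have hsame2 : Mem.SameExcept [⟨(e.reg .rsp).toNat - 3008, (e.reg .rsp).toNat - 3000⟩, ⟨fy, fy + ysz i⟩]
        v.mem s_11127b.mem := by
      u_same
    u_loop_back [j + 1]
    · rw [w_rbx]
      exact succ_counter j (by omega)
    · omega
    · rw [w_flags]
      simp only [X86.User.df_setStatus]
      exact w_df_111292
    · rw [w_mxcsr]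
      exact hmx'
    · exact hvalm _ _ _ (by omega) (by omega) hsame2
    · rw [w_rbx, succ_counter j (by omega)]
      u_omega
  · -- the back edge from 0x1112b3: `finalY[j] = -1` stored, inside the block at `finalY[i]`
    have hjV : ¬ V ≤ j := fun h => hbr_111285 ((cmp_counter V j (by omega) (by omega)).mpr h)
    have hsx := sext_counter j (by omega)
    have hsame2 : Mem.SameExcept [⟨(e.reg .rsp).toNat - 3008, (e.reg .rsp).toNat - 3000⟩, ⟨fy, fy + ysz i⟩]
        v.mem s_11127b.mem := by
      u_same
    u_loop_back [j + 1]
    · rw [w_rbx]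
      exact succ_counter j (by omega)
    · omega
    · rw [w_flags]
      simp only [X86.User.df_setStatus]
      exact w_df_1112a8
    · rw [w_mxcsr]
      exact hmx'
    · exact hvalm _ _ _ (by omega) (by omega) hsame2
    · rw [w_rbx, succ_counter j (by omega)]
      u_omega
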